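-- pv_equiv track=rewrite | github.com/pi-na/SIA-TP1 | src/main.py | normalize_level_selectors
-- ===== SOURCE A (Python) =====
-- def normalize_level_selectors(selectors: list[str] | None) -> list[str]:
--     normalized = []
--     for selector in selectors or []:
--         normalized.extend(
--             part.strip()
--             for part in selector.split(",")
--             if part.strip()
--         )
--     return normalized
-- ===== SOURCE B (Python) =====
-- def normalize_level_selectors(selectors):
--     # Single character-level scan: a small state machine builds each stripped
--     # token directly (pending holds interior whitespace), no split/strip calls.
--     out = []
--     for s in selectors or []:
--         token = ""
--         pending = ""
--         for ch in s + ",":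
--             if ch == ",":
--                 if token:
--                     out.append(token)
--                 token = ""
--                 pending = ""
--             elif ch.isspace():
--                 if token:
--                     pending += ch
--             else:
--                 token += pending + ch
--                 pending = ""
--     return out
-- ===== Notes on version B (the rewrite author's own statement) =====
-- stated objective: alternative
-- what changed: Replaces A's split/strip/filter pipeline per selector with a single character-level state machine that builds each stripped token directly (a pending-whitespace buffer handles trimming), emitting tokens at comma boundaries.
import Mathlib
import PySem

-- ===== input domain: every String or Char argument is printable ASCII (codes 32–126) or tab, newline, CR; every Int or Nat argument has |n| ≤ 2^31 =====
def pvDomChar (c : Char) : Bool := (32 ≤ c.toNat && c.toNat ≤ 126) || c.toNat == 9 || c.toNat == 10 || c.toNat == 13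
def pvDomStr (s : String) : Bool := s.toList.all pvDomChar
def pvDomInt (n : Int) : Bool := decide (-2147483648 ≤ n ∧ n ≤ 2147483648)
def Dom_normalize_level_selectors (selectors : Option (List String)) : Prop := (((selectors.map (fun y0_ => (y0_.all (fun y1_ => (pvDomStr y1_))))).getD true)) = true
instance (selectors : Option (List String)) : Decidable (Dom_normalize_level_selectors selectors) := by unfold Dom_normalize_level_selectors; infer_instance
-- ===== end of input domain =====

-- B replaces A's split/strip/filter pipeline with a single character-level state
-- machine that builds each stripped token directly (objective: alternative).


-- ===== PORT A =====
-- 'part.strip() for part in selector.split(",") if part.strip()' as a filterMap;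
-- selector.split(",") = PySem.Chars.splitOn on the code points (sep "," is nonempty).
def normalize_level_selectors (selectors : Option (List String)) : List String :=
  (selectors.getD []).foldl
    (fun normalized selector =>
      normalized ++
        ((PySem.Chars.splitOn selector.toList [',']).map String.ofList).filterMap
          (fun part => if PySem.Str.strip part ≠ "" then some (PySem.Str.strip part) else none))
    []

-- ===== PORT B =====
-- One step of Source B's inner state machine: state = (token, pending, out).
def nlsStep (st : List Char × List Char × List String) (ch : Char) :
    List Char × List Char × List String :=
  match st with
  | (token, pending, out) =>
    if ch = ',' then
      ([], [], if token ≠ [] then out ++ [String.ofList token] else out)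
    else if PySem.Chars.isspace ch then
      (token, if token ≠ [] then pending ++ [ch] else pending, out)
    else
      (token ++ pending ++ [ch], [], out)

def normalize_level_selectors_alt (selectors : Option (List String)) : List String :=
  (selectors.getD []).foldl
    (fun out s => ((s.toList ++ [',']).foldl nlsStep ([], [], out)).2.2)
    []

-- ===== PRECONDITION & SPEC =====
def Spec_normalize_level_selectors (selectors : Option (List String)) (out : List String) : Prop := out = normalize_level_selectors_alt selectors
instance (selectors : Option (List String)) (out : List String) : Decidable (Spec_normalize_level_selectors selectors out) := by unfold Spec_normalize_level_selectors; infer_instance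

-- ===== CLAIM (what is proved, stated in full; the proofs are below) =====
def Claim_equal_normalize_level_selectors : Prop := ∀ (selectors : Option (List String)), Dom_normalize_level_selectors selectors → Spec_normalize_level_selectors selectors (normalize_level_selectors selectors)

-- ===== LEMMAS AND PROOFS =====

-- Structural characterisation of splitting on a single comma.
def splitComma : List Char → List (List Char)
  | [] => [[]]
  | c :: rest => if c = ',' then [] :: splitComma rest else (splitComma rest).modifyHead (c :: ·)

theorem splitComma_ne_nil (l : List Char) : splitComma l ≠ [] := by
  induction l with
  | nil => simp [splitComma]
  | cons c rest ih =>
    simp only [splitComma]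
    split_ifs
    · simp
    · cases h : splitComma rest with
      | nil => exact absurd h ih
      | cons p ps => simp [List.modifyHead]

theorem splitOn_go_eq (fuel : Nat) (l cur : List Char) (acc : List (List Char))
    (h : l.length < fuel) :
    PySem.Chars.splitOn.go [','] fuel l cur acc
      = acc.reverse ++ (splitComma l).modifyHead (cur.reverse ++ ·) := by
  induction fuel generalizing l cur acc with
  | zero => omega
  | succ n ih =>
    cases l with
    | nil =>
      simp [PySem.Chars.splitOn.go, splitComma, List.modifyHead]
    | cons c rest =>
      by_cases hc : c = ','
      · subst hc
        have hpre : List.isPrefixOf [','] (',' :: rest) = true := by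
          simp [List.isPrefixOf]
        simp only [PySem.Chars.splitOn.go, hpre, if_pos]
        rw [show List.drop [','].length (',' :: rest) = rest from rfl]
        rw [ih rest [] (cur.reverse :: acc) (by simpa using Nat.lt_of_succ_lt_succ h)]
        cases hs : splitComma rest <;> simp [splitComma, List.modifyHead, hs]
      · have hpre : List.isPrefixOf [','] (c :: rest) = false := by
          simp [List.isPrefixOf]
          exact fun he => (hc he.symm).elim
        simp only [PySem.Chars.splitOn.go, hpre]
        rw [if_neg (by simp)]
        rw [ih rest (c :: cur) acc (by simpa using Nat.lt_of_succ_lt_succ h)]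
        simp only [splitComma, if_neg hc]
        cases hs : splitComma rest with
        | nil => exact absurd hs (splitComma_ne_nil rest)
        | cons p ps => simp [List.modifyHead]

theorem splitOn_eq_splitComma (l : List Char) :
    PySem.Chars.splitOn l [','] = splitComma l := by
  unfold PySem.Chars.splitOn
  rw [splitOn_go_eq l.length.succ l [] [] (Nat.lt_succ_self _)]
  cases hs : splitComma l with
  | nil => exact absurd hs (splitComma_ne_nil l)
  | cons p ps => simp [List.modifyHead]

-- The strip/filter pass, as A applies it to a list of pieces.
def passF (ps : List (List Char)) : List String :=
  (ps.map String.ofList).filterMap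
    (fun part => if PySem.Str.strip part ≠ "" then some (PySem.Str.strip part) else none)

theorem strip_ofList (p : List Char) :
    PySem.Str.strip (String.ofList p) = String.ofList (PySem.Chars.strip p) := by
  have h : (PySem.Str.strip (String.ofList p)).toList = (String.ofList (PySem.Chars.strip p)).toList := by
    simp
  exact String.toList_inj.mp h

theorem strip_nil_piece : PySem.Chars.strip [] = [] := rfl

theorem sc_nil : splitComma [] = [[]] := rfl

theorem sc_comma (rest : List Char) : splitComma (',' :: rest) = [] :: splitComma rest := by
  simp [splitComma]

theorem sc_noncomma {c : Char} (hc : c ≠ ',') (rest : List Char) :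
    splitComma (c :: rest) = (splitComma rest).modifyHead (c :: ·) := by
  simp [splitComma, hc]

theorem ofList_eq_empty_iff (p : List Char) : String.ofList p = "" ↔ p = [] := by
  constructor
  · intro h
    have := congrArg String.toList h
    simpa using this
  · intro h; subst h; rfl

-- passF in char-level form.
theorem passF_cons (p : List Char) (ps : List (List Char)) :
    passF (p :: ps)
      = (if PySem.Chars.strip p ≠ [] then [String.ofList (PySem.Chars.strip p)] else [])
          ++ passF ps := by
  simp only [passF, List.map_cons, List.filterMap_cons, strip_ofList]
  by_cases h : PySem.Chars.strip p = []
  · simp [h]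
  · simp only [ne_eq, ofList_eq_empty_iff, h, not_false_eq_true, if_pos]
    simp

theorem A_as_flatMap (ls : List String) :
    ls.foldl
      (fun normalized selector =>
        normalized ++
          ((PySem.Chars.splitOn selector.toList [',']).map String.ofList).filterMap
            (fun part => if PySem.Str.strip part ≠ "" then some (PySem.Str.strip part) else none))
      []
    = ls.flatMap (fun s => passF (splitComma s.toList)) := by
  have h : ∀ (ls : List String) (init : List String),
      ls.foldl
        (fun normalized selector =>
          normalized ++
            ((PySem.Chars.splitOn selector.toList [',']).map String.ofList).filterMap
              (fun part => if PySem.Str.strip part ≠ "" then some (PySem.Str.strip part) else none))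
        init
      = init ++ ls.flatMap (fun s => passF (splitComma s.toList)) := by
    intro ls
    induction ls with
    | nil => intro init; simp
    | cons x xs ih =>
      intro init
      simp only [List.foldl_cons, List.flatMap_cons, splitOn_eq_splitComma, passF]
      simp [List.flatMap_def]
  simpa using h ls []

-- ---- char-level strip facts ----

theorem lstrip_cons_space {c : Char} (hc : PySem.Chars.isspace c = true) (q : List Char) :
    PySem.Chars.lstrip (c :: q) = PySem.Chars.lstrip q := by
  show (c :: q).dropWhile PySem.Chars.isspace = q.dropWhile PySem.Chars.isspace
  simp [hc]

theorem lstrip_cons_nonspace {c : Char} (hc : PySem.Chars.isspace c = false) (q : List Char) :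
    PySem.Chars.lstrip (c :: q) = c :: q := by
  show (c :: q).dropWhile PySem.Chars.isspace = c :: q
  simp [hc]

theorem strip_cons_space {c : Char} (hc : PySem.Chars.isspace c = true) (q : List Char) :
    PySem.Chars.strip (c :: q) = PySem.Chars.strip q := by
  show PySem.Chars.rstrip (PySem.Chars.lstrip (c :: q)) = PySem.Chars.rstrip (PySem.Chars.lstrip q)
  rw [lstrip_cons_space hc]

theorem rstrip_eq_nil_of_all_space {p : List Char} (h : p.all PySem.Chars.isspace = true) :
    PySem.Chars.rstrip p = [] := by
  show (p.reverse.dropWhile PySem.Chars.isspace).reverse = []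
  simp only [List.reverse_eq_nil_iff]
  rw [List.dropWhile_eq_nil_iff]
  intro x hx
  exact List.all_eq_true.mp h x (List.mem_reverse.mp hx)

theorem rstrip_cons_nonspace {c : Char} (hc : PySem.Chars.isspace c = false) (q : List Char) :
    PySem.Chars.rstrip (c :: q) = c :: PySem.Chars.rstrip q := by
  show ((c :: q).reverse.dropWhile PySem.Chars.isspace).reverse
      = c :: (q.reverse.dropWhile PySem.Chars.isspace).reverse
  rw [List.reverse_cons, List.dropWhile_append]
  by_cases h : q.reverse.dropWhile PySem.Chars.isspace = []
  · simp [h, hc]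
  · simp [h, List.isEmpty_iff]

theorem rstrip_append_of_ne_nil (u w : List Char) (h : PySem.Chars.rstrip w ≠ []) :
    PySem.Chars.rstrip (u ++ w) = u ++ PySem.Chars.rstrip w := by
  show ((u ++ w).reverse.dropWhile PySem.Chars.isspace).reverse
      = u ++ (w.reverse.dropWhile PySem.Chars.isspace).reverse
  have hw : w.reverse.dropWhile PySem.Chars.isspace ≠ [] := by
    intro hnil
    exact h (by show (w.reverse.dropWhile PySem.Chars.isspace).reverse = []; simp [hnil])
  rw [List.reverse_append, List.dropWhile_append]
  simp [List.isEmpty_iff, hw]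

theorem strip_cons_nonspace {c : Char} (hc : PySem.Chars.isspace c = false) (q : List Char) :
    PySem.Chars.strip (c :: q) = c :: PySem.Chars.rstrip q := by
  show PySem.Chars.rstrip (PySem.Chars.lstrip (c :: q)) = c :: PySem.Chars.rstrip q
  rw [lstrip_cons_nonspace hc, rstrip_cons_nonspace hc]

-- ---- the state machine versus splitComma + strip ----

-- Main invariant, by strong induction on the length of the remaining input:
-- (P) from the idle state the machine emits exactly passF of the comma-pieces;
-- (Q) with a nonempty token and all-space pending, the first piece completes the
--     token as tok ++ rstrip (pend ++ piece), the rest proceeds as in (P).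
theorem nls_run (n : Nat) : ∀ l : List Char, l.length ≤ n →
    (∀ out : List String,
      (l ++ [',']).foldl nlsStep ([], [], out) = ([], [], out ++ passF (splitComma l)))
    ∧ (∀ (tok pend : List Char) (out : List String), tok ≠ [] →
        pend.all PySem.Chars.isspace = true →
        (l ++ [',']).foldl nlsStep (tok, pend, out)
          = ([], [],
              out ++ [String.ofList (tok ++ PySem.Chars.rstrip (pend ++ (splitComma l).headI))]
                  ++ passF (splitComma l).tail)) := by
  induction n with
  | zero =>
    intro l hl
    have : l = [] := List.length_eq_zero_iff.mp (Nat.le_zero.mp hl)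
    subst this
    constructor
    · intro out
      rw [List.nil_append, List.foldl_cons, List.foldl_nil,
        show nlsStep ([], [], out) ',' = ([], [], out) by simp [nlsStep]]
      rw [sc_nil, passF_cons, strip_nil_piece]
      simp [passF]
    · intro tok pend out htok hpend
      rw [List.nil_append, List.foldl_cons, List.foldl_nil,
        show nlsStep (tok, pend, out) ',' = ([], [], out ++ [String.ofList tok]) by
          simp [nlsStep, htok]]
      rw [sc_nil]
      simp only [List.headI, List.tail_cons]
      rw [List.append_nil, rstrip_eq_nil_of_all_space hpend, List.append_nil]
      simp [passF]
  | succ n ih =>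
    intro l hl
    cases l with
    | nil => exact ih [] (Nat.zero_le n)
    | cons c rest =>
      have hrest : rest.length ≤ n := Nat.le_of_succ_le_succ hl
      obtain ⟨q, qs, hsc⟩ : ∃ q qs, splitComma rest = q :: qs := by
        cases h : splitComma rest with
        | nil => exact absurd h (splitComma_ne_nil rest)
        | cons q qs => exact ⟨q, qs, rfl⟩
      constructor
      · intro out
        by_cases hc : c = ','
        · subst hc
          rw [List.cons_append, List.foldl_cons,
            show nlsStep ([], [], out) ',' = ([], [], out) by simp [nlsStep]]
          rw [(ih rest hrest).1 out, sc_comma, passF_cons, strip_nil_piece]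
          simp
        · by_cases hs : PySem.Chars.isspace c = true
          · rw [List.cons_append, List.foldl_cons,
              show nlsStep ([], [], out) c = ([], [], out) by simp [nlsStep, hc, hs]]
            rw [(ih rest hrest).1 out, sc_noncomma hc, hsc, List.modifyHead,
              passF_cons, passF_cons, strip_cons_space hs]
          · have hs' : PySem.Chars.isspace c = false := by
              cases h : PySem.Chars.isspace c
              · rfl
              · exact absurd h hs
            rw [List.cons_append, List.foldl_cons,
              show nlsStep ([], [], out) c = ([c], [], out) by simp [nlsStep, hc, hs']]
            rw [(ih rest hrest).2 [c] [] out (by simp) (by simp)]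
            rw [sc_noncomma hc, hsc, List.modifyHead]
            simp only [List.headI, List.tail_cons, List.nil_append]
            rw [passF_cons, strip_cons_nonspace hs']
            have hne : ¬ (c :: PySem.Chars.rstrip q = []) := by simp
            simp [hne]
      · intro tok pend out htok hpend
        by_cases hc : c = ','
        · subst hc
          rw [List.cons_append, List.foldl_cons,
            show nlsStep (tok, pend, out) ',' = ([], [], out ++ [String.ofList tok]) by
              simp [nlsStep, htok]]
          rw [(ih rest hrest).1 (out ++ [String.ofList tok]), sc_comma]
          simp only [List.headI, List.tail_cons]
          rw [List.append_nil, rstrip_eq_nil_of_all_space hpend, List.append_nil]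
        · by_cases hs : PySem.Chars.isspace c = true
          · rw [List.cons_append, List.foldl_cons,
              show nlsStep (tok, pend, out) c = (tok, pend ++ [c], out) by
                simp [nlsStep, hc, hs, htok]]
            rw [(ih rest hrest).2 tok (pend ++ [c]) out htok
              (by simp_all [List.all_eq_true])]
            rw [sc_noncomma hc, hsc, List.modifyHead]
            simp only [List.headI, List.tail_cons]
            rw [List.append_assoc pend [c] q]
            rfl
          · have hs' : PySem.Chars.isspace c = false := by
              cases h : PySem.Chars.isspace c
              · rfl
              · exact absurd h hs
            rw [List.cons_append, List.foldl_cons,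
              show nlsStep (tok, pend, out) c = (tok ++ pend ++ [c], [], out) by
                simp [nlsStep, hc, hs']]
            rw [(ih rest hrest).2 (tok ++ pend ++ [c]) [] out (by simp) (by simp)]
            rw [sc_noncomma hc, hsc, List.modifyHead]
            simp only [List.headI, List.tail_cons, List.nil_append]
            rw [show pend ++ c :: q = pend ++ (c :: q) from rfl,
              rstrip_append_of_ne_nil pend (c :: q)
                (by rw [rstrip_cons_nonspace hs']; simp),
              rstrip_cons_nonspace hs']
            simp

theorem nls_selector (s : String) (out : List String) :
    ((s.toList ++ [',']).foldl nlsStep ([], [], out)).2.2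
      = out ++ passF (splitComma s.toList) := by
  rw [(nls_run s.toList.length s.toList (Nat.le_refl _)).1 out]

theorem B_as_flatMap (ls : List String) (init : List String) :
    ls.foldl (fun out s => ((s.toList ++ [',']).foldl nlsStep ([], [], out)).2.2) init
      = init ++ ls.flatMap (fun s => passF (splitComma s.toList)) := by
  rw [show (fun (out : List String) (s : String) =>
        ((s.toList ++ [',']).foldl nlsStep ([], [], out)).2.2)
      = (fun out s => out ++ passF (splitComma s.toList)) from
    funext fun out => funext fun s => nls_selector s out]
  exact PySem.List.foldl_append_eq_flatMap _ ls init

-- ===== VERDICT (by name: the statement is the Claim_ definition above) =====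
theorem normalize_level_selectors_spec : Claim_equal_normalize_level_selectors := by
  intro selectors _
  unfold Spec_normalize_level_selectors normalize_level_selectors normalize_level_selectors_alt
  rw [A_as_flatMap, B_as_flatMap]
  simp
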